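-- pv_equiv track=rewrite | github.com/BorisWinc/for-loops | main.py | most_vowels
-- ===== SOURCE A (Python) =====
-- def most_vowels(countries):
--     vowels = ["A", "E", "I", "O", "U","a", "e", "i", "o", "u"]
--     max_vowels_count = []
--     for country in countries:
--         vow_len = len([char for char in country if char in vowels])
--         max_vowels_count.append((vow_len, country))
--         max_vowels_count.sort(reverse=True)
--     return max_vowels_count[:3]
-- ===== SOURCE B (Python) =====
-- def _insert_desc(pair, top):
--     # insert pair into the descending list top, keeping it descending
--     out = []
--     i = 0
--     while i < len(top) and top[i] >= pair:
--         out.append(top[i])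
--         i += 1
--     return out + [pair] + top[i:]
--
--
-- def most_vowels(countries):
--     vowels = set("AEIOUaeiou")
--     top = []  # at most 3 (count, country) pairs, in descending order
--     for country in countries:
--         pair = (sum(ch in vowels for ch in country), country)
--         top = _insert_desc(pair, top)[:3]
--     return top
-- ===== Notes on version B (the rewrite author's own statement) =====
-- stated objective: faster
-- what changed: A appends each (vowel_count, country) pair and re-sorts the whole list on every iteration; B makes one pass that splices each pair into a bounded top-3 list (insert into a descending 3-element list, truncate), never sorting the full list.
import Mathlib
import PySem

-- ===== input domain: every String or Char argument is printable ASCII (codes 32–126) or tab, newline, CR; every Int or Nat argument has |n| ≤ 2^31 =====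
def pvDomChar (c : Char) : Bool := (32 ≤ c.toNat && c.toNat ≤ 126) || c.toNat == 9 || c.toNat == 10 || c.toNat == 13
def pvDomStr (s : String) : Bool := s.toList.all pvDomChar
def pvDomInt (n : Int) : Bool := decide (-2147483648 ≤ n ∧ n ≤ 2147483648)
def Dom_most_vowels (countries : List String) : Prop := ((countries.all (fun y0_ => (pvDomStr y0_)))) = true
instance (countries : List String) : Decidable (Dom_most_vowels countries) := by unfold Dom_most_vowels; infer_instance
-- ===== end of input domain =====

-- B replaces A's append-and-resort-on-every-iteration loop by one pass that maintains only the current top-3 pairs.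


-- ===== PORT A =====
-- A: for each country append (vowel_count, country) to the list and re-sort it descending; return the first 3.
def most_vowels (countries : List String) : List (Int × String) :=
  let vowels : List Char := ['A', 'E', 'I', 'O', 'U', 'a', 'e', 'i', 'o', 'u']
  let max_vowels_count : List (Int × String) :=
    countries.foldl (fun acc country =>
      let vow_len : Int := ((country.toList.filter (fun ch => decide (ch ∈ vowels))).length : Int)
      PySem.List.sorted2 (acc ++ [(vow_len, country)]) Prod.fst Prod.snd true) []
  PySem.List.slice max_vowels_count none (some 3)

-- ===== PORT B =====
-- B helper: Python tuple comparison y >= p on (Int, String) pairs (negation of lexicographic <).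
def pyGePair (y p : Int × String) : Bool :=
  !(decide (y.1 < p.1) || (y.1 == p.1 && decide (y.2 < p.2)))

-- B helper: _insert_desc — walk past the elements ≥ pair, splice pair in (the while loop, as structural recursion).
def bInsertDesc (p : Int × String) : List (Int × String) → List (Int × String)
  | [] => [p]
  | y :: ys => if pyGePair y p then y :: bInsertDesc p ys else p :: y :: ys

def most_vowels_alt (countries : List String) : List (Int × String) :=
  let vowels : PySem.Set Char := PySem.Set.ofList "AEIOUaeiou".toList
  countries.foldl (fun top country =>
    let pair : Int × String := ((country.toList.countP (fun ch => PySem.Set.contains vowels ch) : Int), country)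
    (bInsertDesc pair top).take 3) []

-- ===== PRECONDITION & SPEC =====
def Spec_most_vowels (countries : List String) (out : List (Int × String)) : Prop := out = most_vowels_alt countries
instance (countries : List String) (out : List (Int × String)) : Decidable (Spec_most_vowels countries out) := by unfold Spec_most_vowels; infer_instance

-- ===== CLAIM (what is proved, stated in full; the proofs are below) =====
def Claim_equal_most_vowels : Prop := ∀ (countries : List String), Dom_most_vowels countries → Spec_most_vowels countries (most_vowels countries)

-- ===== LEMMAS AND PROOFS =====

-- the Python tuple order, as an injective key into a linear order
def pvKey (p : Int × String) : Lex (Int × String) := toLex p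

lemma pvKey_injective : Function.Injective pvKey := fun _ _ h => h

-- A's sort of (count, country) pairs is the reverse sort under the lexicographic key
lemma sorted2_eq_sorted_lex (xs : List (Int × String)) :
    PySem.List.sorted2 xs Prod.fst Prod.snd true = PySem.List.sorted xs pvKey true := by
  simp only [PySem.List.sorted2, PySem.List.sorted]
  congr 1
  funext acc x
  congr 1
  funext a b
  simp only [pvKey, Prod.Lex.lt_iff, ofLex_toLex]
  rcases lt_trichotomy a.1 b.1 with h | h | h
  · simp [h, lt_asymm h]
    exact fun e => absurd e h.ne'
  · simp [h]
  · simp [h, lt_asymm h]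

-- reverse sort only depends on the multiset of elements (key injective)
lemma sorted_rev_perm_congr {xs ys : List (Int × String)} (h : xs.Perm ys) :
    PySem.List.sorted xs pvKey true = PySem.List.sorted ys pvKey true := by
  apply PySem.List.eq_of_perm_of_pairwise_le_of_injective
      (key := fun x => OrderDual.toDual (pvKey x))
  · exact fun a b hab => pvKey_injective (OrderDual.toDual_inj.mp hab)
  · exact ((PySem.List.sorted_perm xs pvKey true).trans h).trans
      (PySem.List.sorted_perm ys pvKey true).symm
  · simpa using PySem.List.sorted_pairwise_rev xs pvKey
  · simpa using PySem.List.sorted_pairwise_rev ys pvKey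

lemma sorted_append_singleton (xs : List (Int × String)) (p : Int × String) :
    PySem.List.sorted (xs ++ [p]) pvKey true =
      PySem.List.insertBy (fun a b => decide (pvKey b < pvKey a)) p (PySem.List.sorted xs pvKey true) := by
  simp [PySem.List.sorted, List.foldl_append]

-- B's splice is exactly the insertion step of the reverse insertion sort
lemma bInsertDesc_eq_insertBy (p : Int × String) (xs : List (Int × String)) :
    bInsertDesc p xs = PySem.List.insertBy (fun a b => decide (pvKey b < pvKey a)) p xs := by
  induction xs with
  | nil => rfl
  | cons y ys ih =>
    have hc : pyGePair y p = !decide (pvKey y < pvKey p) := by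
      simp only [pyGePair, pvKey, Prod.Lex.lt_iff, ofLex_toLex]
      rcases lt_trichotomy y.1 p.1 with h | h | h
      · simp [h]
      · simp [h]
      · simp [lt_asymm h, h.ne']
    simp only [bInsertDesc, PySem.List.insertBy, hc]
    by_cases hd : pvKey y < pvKey p <;> simp [hd, ih]

-- truncating to n commutes with inserting into a truncated list
lemma take_insertBy (before : Int × String → Int × String → Bool) (p : Int × String) :
    ∀ (xs : List (Int × String)) (n : Nat),
      (PySem.List.insertBy before p xs).take n = (PySem.List.insertBy before p (xs.take n)).take n := by
  intro xs
  induction xs with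
  | nil => intro n; simp [PySem.List.insertBy]
  | cons y ys ih =>
    intro n
    match n with
    | 0 => simp
    | Nat.succ m =>
      simp only [List.take_succ_cons, PySem.List.insertBy]
      by_cases hb : before p y = true
      · simp only [if_pos hb, List.take_succ_cons]
        congr 1
        match m with
        | 0 => simp
        | Nat.succ k =>
          simp only [List.take_succ_cons, List.take_take]
          rw [Nat.min_eq_left (Nat.le_succ k)]
      · simp only [if_neg hb, List.take_succ_cons, ih m]

-- the two vowel counters agree
lemma count_eq (s : List Char) :
    ((s.filter (fun ch => decide (ch ∈ (['A', 'E', 'I', 'O', 'U', 'a', 'e', 'i', 'o', 'u'] : List Char)))).length : Int)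
      = ((s.countP (fun ch => PySem.Set.contains (PySem.Set.ofList "AEIOUaeiou".toList) ch)) : Int) := by
  have hset : PySem.Set.ofList "AEIOUaeiou".toList
      = (['A', 'E', 'I', 'O', 'U', 'a', 'e', 'i', 'o', 'u'] : List Char) := by decide
  rw [List.countP_eq_length_filter, hset]
  congr 1
  congr 1
  apply List.filter_congr
  intro c _
  simp [PySem.Set.contains, List.contains_eq_mem]

-- A's loop invariant: the accumulator is the reverse-sorted list of the pairs seen so far
lemma A_inv (l : List String) : ∀ (ys : List (Int × String)),
    l.foldl (fun acc country =>
        let vow_len : Int := ((country.toList.filter (fun ch =>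
          decide (ch ∈ (['A', 'E', 'I', 'O', 'U', 'a', 'e', 'i', 'o', 'u'] : List Char)))).length : Int)
        PySem.List.sorted2 (acc ++ [(vow_len, country)]) Prod.fst Prod.snd true)
      (PySem.List.sorted ys pvKey true)
    = PySem.List.sorted (ys ++ l.map (fun c =>
        (((c.toList.filter (fun ch =>
          decide (ch ∈ (['A', 'E', 'I', 'O', 'U', 'a', 'e', 'i', 'o', 'u'] : List Char)))).length : Int), c))) pvKey true := by
  induction l with
  | nil => intro ys; simp
  | cons c t ih =>
    intro ys
    simp only [List.foldl_cons, List.map_cons]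
    rw [sorted2_eq_sorted_lex, sorted_append_singleton, ← sorted_append_singleton,
      sorted_rev_perm_congr (List.Perm.append_right _ (PySem.List.sorted_perm ys pvKey true)),
      ih (ys ++ [_])]
    simp

-- B's loop invariant: the accumulator is the first three of that reverse-sorted list
lemma B_inv (l : List String) : ∀ (ys : List (Int × String)),
    l.foldl (fun top country =>
        (bInsertDesc ((((country.toList.filter (fun ch =>
          decide (ch ∈ (['A', 'E', 'I', 'O', 'U', 'a', 'e', 'i', 'o', 'u'] : List Char)))).length : Int)), country) top).take 3)
      ((PySem.List.sorted ys pvKey true).take 3)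
    = (PySem.List.sorted (ys ++ l.map (fun c =>
        (((c.toList.filter (fun ch =>
          decide (ch ∈ (['A', 'E', 'I', 'O', 'U', 'a', 'e', 'i', 'o', 'u'] : List Char)))).length : Int), c))) pvKey true).take 3 := by
  induction l with
  | nil => intro ys; simp
  | cons c t ih =>
    intro ys
    simp only [List.foldl_cons, List.map_cons]
    rw [bInsertDesc_eq_insertBy, ← take_insertBy, ← sorted_append_singleton,
      ih (ys ++ [_])]
    simp

-- ===== VERDICT (by name: the statement is the Claim_ definition above) =====
theorem most_vowels_spec : Claim_equal_most_vowels := by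
  intro countries _
  unfold Spec_most_vowels most_vowels most_vowels_alt
  simp only []
  have hB : (fun (top : List (Int × String)) (country : String) =>
      (bInsertDesc (((country.toList.countP (fun ch =>
          PySem.Set.contains (PySem.Set.ofList "AEIOUaeiou".toList) ch)) : Int), country) top).take 3)
      = (fun top country =>
      (bInsertDesc ((((country.toList.filter (fun ch =>
          decide (ch ∈ (['A', 'E', 'I', 'O', 'U', 'a', 'e', 'i', 'o', 'u'] : List Char)))).length : Int)), country) top).take 3) := by
    funext top country
    rw [← count_eq]
  have hA := A_inv countries ([] : List (Int × String))
  have hB' := B_inv countries ([] : List (Int × String))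
  simp only [List.nil_append] at hA hB'
  rw [hB]
  have h0 : PySem.List.sorted ([] : List (Int × String)) pvKey true = [] := rfl
  rw [h0] at hA hB'
  simp only [List.take_nil] at hB'
  rw [hA, hB', PySem.List.slice_to _ (by norm_num)]
  rfl
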